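-- pv_equiv track=rewrite | github.com/Trenj/data_algorithms_1-6 | ПР_№3/code/sets.py | count_punctuation
-- ===== SOURCE A (Python) =====
-- def count_punctuation(input_string):
--     # Вручную определяем строку со всеми строчными латинскими буквами
--     lowercase_letters = 'abcdefghijklmnopqrstuvwxyz'
--
--     # Вручную определяем строку со всеми знаками пунктуации
--     punctuation_marks = '!"#$%&\'() * +, -./:; <= > ?@[] ^ _`{ |}~'
--
--     # Строка в нижнем регистре
--     input_string_lowercase = input_string.lower()
--
--     # Формируем множество букв
--     letters_in_string = []
--     for char in lowercase_letters:
--         if char in input_string_lowercase and char not in letters_in_string: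
--             letters_in_string.append(char)
--
--     # Подсчитываем количество знаков препинания
--     punctuation_count = 0
--     for char in input_string:
--         if char in punctuation_marks:
--             punctuation_count += 1
--
--     return letters_in_string, punctuation_count
-- ===== SOURCE B (Python) =====
-- def count_punctuation(input_string):
--     punctuation_marks = '!"#$%&\'() * +, -./:; <= > ?@[] ^ _`{ |}~'
--     mask = 0
--     count = 0
--     for ch in input_string:
--         lc = ch.lower()
--         if 'a' <= lc <= 'z':
--             mask |= 1 << (ord(lc) - 97)
--         if ch in punctuation_marks:
--             count += 1
--     letters = [chr(97 + i) for i in range(26) if mask >> i & 1]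
--     return letters, count
-- ===== Notes on version B (the rewrite author's own statement) =====
-- stated objective: alternative
-- what changed: Replaces A's two staged loops (a pass over the fixed alphabet doing a substring test and a duplicate check per letter, plus a separate punctuation-counting pass) with ONE pass over the input string maintaining a 26-bit presence bitmask and the punctuation count together, then decoding the bitmask into letters in alphabetical order.
import Mathlib
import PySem

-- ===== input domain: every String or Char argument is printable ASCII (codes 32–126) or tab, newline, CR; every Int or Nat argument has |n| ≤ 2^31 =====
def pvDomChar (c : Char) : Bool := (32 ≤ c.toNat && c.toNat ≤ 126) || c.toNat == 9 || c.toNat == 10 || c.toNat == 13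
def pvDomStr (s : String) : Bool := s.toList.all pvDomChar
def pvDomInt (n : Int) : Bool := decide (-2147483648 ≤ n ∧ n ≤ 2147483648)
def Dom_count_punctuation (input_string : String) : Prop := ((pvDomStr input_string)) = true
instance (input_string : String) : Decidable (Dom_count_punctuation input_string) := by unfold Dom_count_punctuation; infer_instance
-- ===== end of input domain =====

-- B replaces A's two staged loops (a pass over the fixed alphabet with a substring test and a
-- duplicate check per letter, plus a separate counting pass) by ONE pass over the input that
-- maintains a 26-bit presence bitmask together with the punctuation count, then decodes the mask.

-- the two string literals of the Python source, as character lists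
def pvAlphabet : List Char := "abcdefghijklmnopqrstuvwxyz".toList
def pvPunct : List Char := "!\"#$%&'() * +, -./:; <= > ?@[] ^ _`{ |}~".toList

-- ===== PORT A =====
-- Python 'char in string' is ported as list membership: exact, since the needle is a single character.
def count_punctuation (input_string : String) : List String × Int :=
  let lowered := (PySem.Str.lower input_string).toList
  let letters := pvAlphabet.foldl
    (fun acc c =>
      if lowered.contains c && !(acc.contains (String.ofList [c])) then acc ++ [String.ofList [c]] else acc)
    []
  let cnt := input_string.toList.foldl
    (fun n c => if pvPunct.contains c then n + 1 else n) (0 : Int)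
  (letters, cnt)

-- ===== PORT B =====
-- the loop body of Source B: update the mask ('mask |= 1 << (ord(lc)-97)' when lc is a lowercase letter)
-- and the punctuation count
def pvMaskStep (m : Nat) (ch : Char) : Nat :=
  let lc := PySem.Chars.lowerChar ch
  if 'a' ≤ lc ∧ lc ≤ 'z' then m ||| (1 <<< (lc.toNat - 97)) else m

def pvCountStep (n : Int) (ch : Char) : Int :=
  if pvPunct.contains ch then n + 1 else n

def count_punctuation_alt (input_string : String) : List String × Int :=
  let st := input_string.toList.foldl
    (fun (mc : Nat × Int) ch => (pvMaskStep mc.1 ch, pvCountStep mc.2 ch)) (0, 0)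
  -- 'mask >> i & 1' is Nat.testBit; 'chr(97+i)' is Char.ofNat (97+i)
  let letters := ((List.range 26).filter (fun i => st.1.testBit i)).map
    (fun i => String.ofList [Char.ofNat (97 + i)])
  (letters, st.2)

-- ===== PRECONDITION & SPEC =====
def Spec_count_punctuation (input_string : String) (out : List String × Int) : Prop := out = count_punctuation_alt input_string
instance (input_string : String) (out : List String × Int) : Decidable (Spec_count_punctuation input_string out) := by unfold Spec_count_punctuation; infer_instance

-- ===== CLAIM (what is proved, stated in full; the proofs are below) =====
def Claim_equal_count_punctuation : Prop := ∀ (input_string : String), Dom_count_punctuation input_string → Spec_count_punctuation input_string (count_punctuation input_string)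

-- ===== LEMMAS AND PROOFS =====

lemma pv_char_eq_iff (a b : Char) : a = b ↔ a.toNat = b.toNat :=
  eq_iff_eq_of_cmp_eq_cmp rfl

lemma pv_char_le_iff (a b : Char) : (a ≤ b) ↔ a.toNat ≤ b.toNat := by
  rw [Char.le_def, UInt32.le_iff_toNat_le]; rfl

lemma pv_chr_toNat (i : Nat) (h : i < 26) : (Char.ofNat (97 + i)).toNat = 97 + i := by
  rw [Char.toNat_ofNat, if_pos]; exact Or.inl (by omega)

-- a fold over a pair whose components are updated independently splits into two folds
lemma pv_foldl_pair {α β γ : Type} (g : α → γ → α) (h : β → γ → β) :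
    ∀ (l : List γ) (a : α) (b : β),
      l.foldl (fun p c => (g p.1 c, h p.2 c)) (a, b) = (l.foldl g a, l.foldl h b) := by
  intro l
  induction l with
  | nil => intro a b; rfl
  | cons c l ih => intro a b; simpa using ih (g a c) (h b c)

-- one mask update, read back through testBit
lemma pv_maskStep_testBit (m : Nat) (c : Char) (i : Nat) (hi : i < 26) :
    (pvMaskStep m c).testBit i
      = (m.testBit i || (PySem.Chars.lowerChar c == Char.ofNat (97 + i))) := by
  unfold pvMaskStep
  set lc := PySem.Chars.lowerChar c with hlc
  by_cases hg : 'a' ≤ lc ∧ lc ≤ 'z'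
  · have h1 : lc.toNat ≥ 97 := by
      have := (pv_char_le_iff 'a' lc).mp hg.1; simpa using this
    have h2 : lc.toNat ≤ 122 := by
      have := (pv_char_le_iff lc 'z').mp hg.2; simpa using this
    rw [if_pos hg, Nat.testBit_or, Nat.one_shiftLeft, Nat.testBit_two_pow]
    congr 1
    have hbeq : (lc == Char.ofNat (97 + i)) = decide (lc.toNat = 97 + i) := by
      by_cases hh : lc.toNat = 97 + i
      · have he : lc = Char.ofNat (97 + i) :=
          (pv_char_eq_iff _ _).mpr (by rw [pv_chr_toNat i hi]; exact hh)
        simp [he, pv_chr_toNat i hi]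
      · have he : lc ≠ Char.ofNat (97 + i) := fun hc => hh (by rw [hc, pv_chr_toNat i hi])
        simp [he, hh]
    rw [hbeq]
    have hiff : lc.toNat - 97 = i ↔ lc.toNat = 97 + i := by omega
    simp [hiff]
  · rw [if_neg hg]
    have hne : (lc == Char.ofNat (97 + i)) = false := by
      simp only [beq_eq_false_iff_ne, ne_eq]
      intro hc
      apply hg
      have ht : lc.toNat = 97 + i := by rw [hc, pv_chr_toNat i hi]
      exact ⟨(pv_char_le_iff 'a' lc).mpr (by simp [ht]),
             (pv_char_le_iff lc 'z').mpr (by simp [ht]; omega)⟩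
    simp [hne]

-- bit i of the final mask says whether letter 97+i occurs in the lowered string
lemma pv_mask_testBit (l : List Char) : ∀ (m : Nat) (i : Nat), i < 26 →
    (l.foldl pvMaskStep m).testBit i
      = (m.testBit i || (l.map PySem.Chars.lowerChar).contains (Char.ofNat (97 + i))) := by
  induction l with
  | nil => intro m i _; simp
  | cons c l ih =>
    intro m i hi
    rw [List.foldl_cons, ih (pvMaskStep m c) i hi, pv_maskStep_testBit m c i hi]
    simp only [List.map_cons, List.contains_cons]
    rw [Bool.or_assoc]
    congr 2
    by_cases h : PySem.Chars.lowerChar c = Char.ofNat (97 + i)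
    · simp [h]
    · simp [h, Ne.symm h]

-- A's accumulator loop over a duplicate-free list equals filter-then-map.
lemma pv_fold_letters (L : List Char) :
    ∀ (cs : List Char) (acc : List String), cs.Nodup → (∀ c ∈ cs, String.ofList [c] ∉ acc) →
      cs.foldl
        (fun acc c =>
          if L.contains c && !(acc.contains (String.ofList [c])) then acc ++ [String.ofList [c]] else acc)
        acc
      = acc ++ (cs.filter (fun c => L.contains c)).map (fun c => String.ofList [c]) := by
  intro cs
  induction cs with
  | nil => intro acc _ _; simp
  | cons c cs ih =>
    intro acc hnd hacc
    have hcnot : acc.contains (String.ofList [c]) = false := by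
      simpa using hacc c (List.mem_cons_self ..)
    by_cases hL : c ∈ L
    · have hLc : L.contains c = true := by simpa using hL
      rw [List.foldl_cons, if_pos (by simp [hL]; simpa using hcnot),
        ih (acc ++ [String.ofList [c]]) hnd.of_cons ?_, List.filter_cons_of_pos hLc]
      · simp only [List.map_cons, List.append_assoc, List.singleton_append]
      · intro c' hc'
        simp only [List.mem_append, List.mem_singleton]
        rintro (h | h)
        · exact hacc c' (List.mem_cons_of_mem _ hc') h
        · have hcc : c' = c := by simpa using congrArg String.toList h
          exact (List.nodup_cons.mp hnd).1 (hcc ▸ hc')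
    · have hLc : ¬ (L.contains c = true) := by simpa using hL
      rw [List.foldl_cons, if_neg (by simp [hL]),
        ih acc hnd.of_cons (fun c' hc' => hacc c' (List.mem_cons_of_mem _ hc')),
        List.filter_cons_of_neg hLc]

lemma pv_alphabet_nodup : pvAlphabet.Nodup := by decide

lemma pv_alphabet_eq : pvAlphabet = (List.range 26).map (fun i => Char.ofNat (97 + i)) := by decide

-- ===== VERDICT (by name: the statement is the Claim_ definition above) =====
theorem count_punctuation_spec : Claim_equal_count_punctuation := by
  intro s _
  unfold Spec_count_punctuation
  simp only [count_punctuation, count_punctuation_alt,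
    pv_foldl_pair pvMaskStep pvCountStep s.toList 0 0, Prod.mk.injEq]
  refine ⟨?_, ?_⟩
  · -- letters
    have hlow : (PySem.Str.lower s).toList = s.toList.map PySem.Chars.lowerChar := by
      simp [PySem.Str.toList_lower]; rfl
    rw [pv_fold_letters _ pvAlphabet [] pv_alphabet_nodup (by simp), List.nil_append, hlow]
    have hfc : (List.range 26).filter (fun i => (s.toList.foldl pvMaskStep 0).testBit i)
        = (List.range 26).filter
            (fun i => (s.toList.map PySem.Chars.lowerChar).contains (Char.ofNat (97 + i))) := by
      apply List.filter_congr
      intro i hi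
      rw [pv_mask_testBit s.toList 0 i (List.mem_range.mp hi)]
      simp
    rw [hfc, pv_alphabet_eq, List.filter_map, List.map_map]
    rfl
  · -- count: A's inline loop body IS pvCountStep
    rfl
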